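-- pv_equiv track=rewrite | github.com/TomWatson6/AdventOfCode | Python/2019/6/solution.py | transfers
-- ===== SOURCE A (Python) =====
-- def transfers(orbits, a, b):
--     a_orbits = {}
--     i = 0
--
--     while a in orbits:
--         a_orbits[orbits[a]] = i
--         i += 1
--         a = orbits[a]
--
--     b_orbits = {}
--     i = 0
--
--     while b in orbits:
--         b_orbits[orbits[b]] = i
--         i += 1
--         b = orbits[b]
--
--     for a in a_orbits.keys():
--         if a in b_orbits:
--             return a_orbits[a] + b_orbits[a]
--
--     return 0
-- ===== SOURCE B (Python) =====
-- def transfers(orbits, a, b):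
--     # Walk each parent chain to the root, then count the common suffix of the
--     # two chains (longest shared ancestor tail) and derive both distances from it.
--     def chain(x):
--         out = []
--         while x in orbits:
--             x = orbits[x]
--             out.append(x)
--         return out
--
--     ca = chain(a)
--     cb = chain(b)
--     ra = ca[::-1]
--     rb = cb[::-1]
--     c = 0
--     while c < len(ra) and c < len(rb) and ra[c] == rb[c]:
--         c += 1
--     if c == 0:
--         return 0
--     return (len(ca) - c) + (len(cb) - c)
-- ===== Notes on version B (the rewrite author's own statement) =====
-- stated objective: alternative
-- what changed: Replaces A's two ancestor-index dicts plus a hash-membership scan by building the two parent chains as lists, reversing them and counting their common prefix (= longest common ancestor suffix), from which both distances follow arithmetically.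
import Mathlib
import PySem

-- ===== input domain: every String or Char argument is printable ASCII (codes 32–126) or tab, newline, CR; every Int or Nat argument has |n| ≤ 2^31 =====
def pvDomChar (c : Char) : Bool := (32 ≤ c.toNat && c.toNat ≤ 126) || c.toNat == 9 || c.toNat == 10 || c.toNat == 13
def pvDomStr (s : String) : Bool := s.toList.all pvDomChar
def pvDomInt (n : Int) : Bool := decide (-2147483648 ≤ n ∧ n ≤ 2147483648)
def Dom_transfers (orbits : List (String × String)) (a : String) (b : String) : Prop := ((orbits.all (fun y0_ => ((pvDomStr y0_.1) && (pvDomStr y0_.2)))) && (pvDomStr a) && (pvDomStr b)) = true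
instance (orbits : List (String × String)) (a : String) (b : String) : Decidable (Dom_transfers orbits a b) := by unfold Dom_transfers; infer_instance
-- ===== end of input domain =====

-- B replaces A's two ancestor-index dicts and hash scan by reversing the two parent
-- chains and counting their common prefix; alternative decomposition, same cost.

-- ===== PORT A =====
-- the two 'while x in orbits' loops: fuel-bounded recursion (fuel orbits.length+1
-- suffices under Pre_, which demands both chains terminate)
def buildOrbitMap (d : PySem.Dict String String) (x : String) (i : Int)
    (acc : PySem.Dict String Int) : Nat → PySem.Dict String Int
  | 0 => acc
  | n + 1 =>
    match d.get? x with
    | none => acc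
    | some p => buildOrbitMap d p (i + 1) (acc.insert p i) n

-- 'for a in a_orbits.keys(): if a in b_orbits: return …' / final 'return 0'
def scanKeys (ao bo : PySem.Dict String Int) : List String → Int
  | [] => 0
  | k :: ks =>
    if bo.contains k then ao.getD k 0 + bo.getD k 0
    else scanKeys ao bo ks

def transfers (orbits : List (String × String)) (a : String) (b : String) : Int :=
  let d := PySem.Dict.ofList orbits
  let ao := buildOrbitMap d a 0 PySem.Dict.empty (orbits.length + 1)
  let bo := buildOrbitMap d b 0 PySem.Dict.empty (orbits.length + 1)
  scanKeys ao bo ao.keys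

-- ===== PORT B =====
-- the 'while x in orbits: out.append(orbits[x])' loop of Source B (same fuel bound)
def chainList (d : PySem.Dict String String) (x : String) : Nat → List String
  | 0 => []
  | n + 1 =>
    match d.get? x with
    | none => []
    | some p => p :: chainList d p n

-- the 'while c < len(ra) and c < len(rb) and ra[c] == rb[c]: c += 1' loop of Source B
def commonPrefixLen : List String → List String → Int
  | x :: xs, y :: ys => if x = y then 1 + commonPrefixLen xs ys else 0
  | _, _ => 0

def transfers_alt (orbits : List (String × String)) (a : String) (b : String) : Int :=
  let d := PySem.Dict.ofList orbits
  let ca := chainList d a (orbits.length + 1)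
  let cb := chainList d b (orbits.length + 1)
  let c := commonPrefixLen ca.reverse cb.reverse
  if c = 0 then 0
  else ((ca.length : Int) - c) + ((cb.length : Int) - c)

-- ===== PRECONDITION & SPEC =====
-- one step up the parent map (identity on non-keys)
def parentStep (d : PySem.Dict String String) (x : String) : String := (d.get? x).getD x

-- Pre_ excludes exactly the inputs on which A (and B) loop forever: a cyclic parent
-- chain reachable from a or from b.  Stated as a graph condition: some iterate of the
-- parent map (within the number of entries, which always suffices) leaves the key set.
def Pre_transfers (orbits : List (String × String)) (a : String) (b : String) : Prop :=
  (∃ n ≤ orbits.length,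
    (PySem.Dict.ofList orbits).contains ((parentStep (PySem.Dict.ofList orbits))^[n] a) = false) ∧
  (∃ n ≤ orbits.length,
    (PySem.Dict.ofList orbits).contains ((parentStep (PySem.Dict.ofList orbits))^[n] b) = false)

instance (orbits : List (String × String)) (a : String) (b : String) : Decidable (Pre_transfers orbits a b) := by unfold Pre_transfers; infer_instance

def pvWitness_transfers : (List (String × String)) × String × String :=
  ([("A", "B"), ("C", "B")], "A", "C")

def Spec_transfers (orbits : List (String × String)) (a : String) (b : String) (out : Int) : Prop := out = transfers_alt orbits a b
instance (orbits : List (String × String)) (a : String) (b : String) (out : Int) : Decidable (Spec_transfers orbits a b out) := by unfold Spec_transfers; infer_instance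

-- ===== CLAIM (what is proved, stated in full; the proofs are below) =====
def Claim_equal_transfers : Prop := ∀ (orbits : List (String × String)) (a : String) (b : String), Dom_transfers orbits a b → Pre_transfers orbits a b → Spec_transfers orbits a b (transfers orbits a b)

-- ===== LEMMAS AND PROOFS =====

-- the full ancestor chain of x, or none if it does not escape the key set within the fuel
def chainFuel (d : PySem.Dict String String) (x : String) : Nat → Option (List String)
  | 0 => none
  | n + 1 =>
    match d.get? x with
    | none => some []
    | some p => (chainFuel d p n).map (p :: ·)


-- an escaping iterate of the parent map means the fuelled chain computation succeeds
theorem chainFuel_isSome_of_escape (d : PySem.Dict String String) :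
    ∀ (n : Nat) (x : String) (m : Nat), n < m →
      d.contains ((parentStep d)^[n] x) = false → (chainFuel d x m).isSome = true := by
  intro n
  induction n with
  | zero =>
    intro x m hm hesc
    simp only [Function.iterate_zero, id] at hesc
    rw [PySem.Dict.contains_eq_isSome_get?] at hesc
    have hg : d.get? x = none := by
      cases h : d.get? x with
      | none => rfl
      | some p => rw [h] at hesc; simp at hesc
    cases m with
    | zero => omega
    | succ k => simp [chainFuel, hg]
  | succ n ih =>
    intro x m hm hesc
    cases m with
    | zero => omega
    | succ k =>
      cases hg : d.get? x with
      | none => simp [chainFuel, hg]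
      | some p =>
        have hstep : parentStep d x = p := by simp [parentStep, hg]
        rw [Function.iterate_succ_apply, hstep] at hesc
        have := ih p k (by omega) hesc
        simp only [chainFuel, hg]
        simpa using this

-- abstract characterisation of a full parent chain
def PChain (d : PySem.Dict String String) : String → List String → Prop
  | x, [] => d.get? x = none
  | x, p :: l => d.get? x = some p ∧ PChain d p l

theorem isChain_of_chainFuel (d : PySem.Dict String String) :
    ∀ (n : Nat) (x : String) (l : List String), chainFuel d x n = some l → PChain d x l := by
  intro n
  induction n with
  | zero => intro x l h; simp [chainFuel] at h
  | succ n ih =>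
    intro x l h
    simp only [chainFuel] at h
    cases hg : d.get? x with
    | none => simp only [hg] at h; cases h; exact hg
    | some p =>
      simp only [hg] at h
      cases hc : chainFuel d p n with
      | none => rw [hc] at h; simp at h
      | some t =>
        rw [hc] at h; simp at h
        subst h
        exact ⟨hg, ih p t hc⟩

theorem chainFuel_length_lt (d : PySem.Dict String String) :
    ∀ (n : Nat) (x : String) (l : List String), chainFuel d x n = some l → l.length < n := by
  intro n
  induction n with
  | zero => intro x l h; simp [chainFuel] at h
  | succ n ih =>
    intro x l h
    simp only [chainFuel] at h
    cases hg : d.get? x with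
    | none => simp only [hg] at h; cases h; simp
    | some p =>
      simp only [hg] at h
      cases hc : chainFuel d p n with
      | none => rw [hc] at h; simp at h
      | some t =>
        rw [hc] at h; simp at h
        subst h
        simpa using Nat.succ_lt_succ (ih p t hc)

theorem chainList_eq_of_chainFuel (d : PySem.Dict String String) :
    ∀ (n : Nat) (x : String) (l : List String), chainFuel d x n = some l → chainList d x n = l := by
  intro n
  induction n with
  | zero => intro x l h; simp [chainFuel] at h
  | succ n ih =>
    intro x l h
    simp only [chainFuel] at h
    simp only [chainList]
    cases hg : d.get? x with
    | none => simp only [hg] at h; cases h; rfl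
    | some p =>
      simp only [hg] at h
      cases hc : chainFuel d p n with
      | none => rw [hc] at h; simp at h
      | some t =>
        rw [hc] at h; simp at h
        subst h
        simp [ih p t hc]

theorem isChain_unique (d : PySem.Dict String String) :
    ∀ (l₁ l₂ : List String) (x : String), PChain d x l₁ → PChain d x l₂ → l₁ = l₂ := by
  intro l₁
  induction l₁ with
  | nil =>
    intro l₂ x h1 h2
    cases l₂ with
    | nil => rfl
    | cons p t => simp [PChain] at h1 h2; rw [h1] at h2; exact absurd h2.1 (by simp)
  | cons p t ih =>
    intro l₂ x h1 h2
    cases l₂ with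
    | nil => simp [PChain] at h1 h2; rw [h2] at h1; exact absurd h1.1 (by simp)
    | cons q s =>
      simp [PChain] at h1 h2
      have hpq : p = q := by rw [h1.1] at h2; exact (Option.some.injEq _ _ ▸ h2.1.symm : q = p).symm
      subst hpq
      rw [ih s p h1.2 h2.2]

theorem isChain_drop (d : PySem.Dict String String) :
    ∀ (l : List String) (x : String), PChain d x l → ∀ i (h : i < l.length), PChain d l[i] (l.drop (i + 1)) := by
  intro l
  induction l with
  | nil => intro x _ i h; simp at h
  | cons p t ih =>
    intro x hc i h
    cases i with
    | zero => simpa using hc.2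
    | succ j =>
      simp only [List.getElem_cons_succ, List.drop_succ_cons]
      exact ih p hc.2 j (by simpa using h)

-- chains through a common element share their whole suffix
theorem isChain_cross (d : PySem.Dict String String) (la lb : List String) (x y : String)
    (ha : PChain d x la) (hb : PChain d y lb) (i j : Nat) (hi : i < la.length)
    (hj : j < lb.length) (he : la[i] = lb[j]) : la.drop i = lb.drop j := by
  have h1 := isChain_drop d la x ha i hi
  have h2 := isChain_drop d lb y hb j hj
  rw [he] at h1
  have := isChain_unique d _ _ _ h1 h2
  rw [List.drop_eq_getElem_cons hi, List.drop_eq_getElem_cons hj, he, this]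

theorem isChain_nodup (d : PySem.Dict String String) (l : List String) (x : String)
    (h : PChain d x l) : l.Nodup := by
  rw [List.nodup_iff_injective_getElem]
  rintro ⟨i, hi⟩ ⟨j, hj⟩ he
  simp only at he
  have hlen : l.length - i = l.length - j := by
    have h1 := isChain_cross d l l x x h h i j hi hj he
    have := congrArg List.length h1
    simp [List.length_drop] at this
    omega
  simpa [Fin.ext_iff] using (by omega : i = j)

-- indexed pairs of a chain, as A's dict builds them
def idxPairs (i : Int) : List String → List (String × Int)
  | [] => []
  | p :: t => (p, i) :: idxPairs (i + 1) t

theorem idxPairs_map_fst (i : Int) : ∀ (l : List String), (idxPairs i l).map Prod.fst = l := by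
  intro l
  induction l generalizing i with
  | nil => rfl
  | cons p t ih => simp [idxPairs, ih]

theorem mem_idxPairs (l : List String) : ∀ (i : Int) (j : Nat) (hj : j < l.length),
    (l[j], i + (j : Int)) ∈ idxPairs i l := by
  induction l with
  | nil => intro i j hj; simp at hj
  | cons p t ih =>
    intro i j hj
    cases j with
    | zero => simp [idxPairs]
    | succ k =>
      simp only [List.getElem_cons_succ]
      have := ih (i + 1) k (by simpa using hj)
      simp only [idxPairs, List.mem_cons]
      right
      convert this using 2
      push_cast
      ring

theorem buildOrbitMap_items (d : PySem.Dict String String) :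
    ∀ (l : List String) (x : String) (i : Int) (acc : PySem.Dict String Int) (n : Nat),
      PChain d x l → l.Nodup → (∀ p ∈ l, acc.contains p = false) → l.length < n →
      (buildOrbitMap d x i acc n).items = acc.items ++ idxPairs i l := by
  intro l
  induction l with
  | nil =>
    intro x i acc n hc _ _ hn
    have hg : d.get? x = none := hc
    cases n with
    | zero => omega
    | succ m => simp [buildOrbitMap, hg, idxPairs]
  | cons p t ih =>
    intro x i acc n hc hnd hfresh hn
    cases n with
    | zero => omega
    | succ m =>
      simp only [buildOrbitMap, hc.1]
      have hpf : acc.contains p = false := hfresh p (by simp)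
      have hstep := ih p (i + 1) (acc.insert p i) m hc.2 hnd.of_cons
        (by
          intro q hq
          have hqp : q ≠ p := by
            intro hqp; subst hqp
            exact (List.nodup_cons.mp hnd).1 hq
          rw [PySem.Dict.contains_insert]
          simp [hqp, hfresh q (by simp [hq])])
        (by simpa using hn)
      rw [hstep, PySem.Dict.items_insert_of_not_contains _ _ hpf]
      simp [idxPairs]

-- scanKeys is a find-first over the key list
theorem scanKeys_eq_find (ao bo : PySem.Dict String Int) :
    ∀ (l : List String), scanKeys ao bo l =
      match l.find? (fun k => bo.contains k) with
      | some k => ao.getD k 0 + bo.getD k 0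
      | none => 0 := by
  intro l
  induction l with
  | nil => rfl
  | cons k ks ih =>
    simp only [scanKeys, List.find?_cons]
    by_cases h : bo.contains k = true
    · simp [h]
    · simp only [Bool.not_eq_true] at h
      simp [h, ih]

-- common prefix length: Nat version and its properties
def cpN : List String → List String → Nat
  | x :: xs, y :: ys => if x = y then 1 + cpN xs ys else 0
  | _, _ => 0

theorem commonPrefixLen_eq_cpN : ∀ (xs ys : List String), commonPrefixLen xs ys = (cpN xs ys : Int) := by
  intro xs
  induction xs with
  | nil => intro ys; cases ys <;> simp [commonPrefixLen, cpN]
  | cons x xt ih =>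
    intro ys
    cases ys with
    | nil => simp [commonPrefixLen, cpN]
    | cons y yt =>
      simp only [commonPrefixLen, cpN]
      split_ifs with h
      · rw [ih]; push_cast; ring
      · rfl

theorem cpN_le_left : ∀ (xs ys : List String), cpN xs ys ≤ xs.length := by
  intro xs
  induction xs with
  | nil => intro ys; cases ys <;> simp [cpN]
  | cons x xt ih =>
    intro ys
    cases ys with
    | nil => simp [cpN]
    | cons y yt =>
      simp only [cpN]
      split_ifs with h
      · have := ih yt; simp; omega
      · simp

theorem cpN_comm_aux : ∀ (xs ys : List String), cpN xs ys = cpN ys xs := by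
  intro xs
  induction xs with
  | nil => intro ys; cases ys <;> simp [cpN]
  | cons x xt ih =>
    intro ys
    cases ys with
    | nil => simp [cpN]
    | cons y yt =>
      simp only [cpN]
      split_ifs with h h2 h2
      · rw [ih]
      · exact absurd h.symm h2
      · exact absurd h2.symm h
      · rfl

theorem cpN_le_right (xs ys : List String) : cpN xs ys ≤ ys.length := by
  rw [cpN_comm_aux]; exact cpN_le_left ys xs

theorem cpN_take : ∀ (xs ys : List String), xs.take (cpN xs ys) = ys.take (cpN xs ys) := by
  intro xs
  induction xs with
  | nil => intro ys; cases ys <;> simp [cpN]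
  | cons x xt ih =>
    intro ys
    cases ys with
    | nil => simp [cpN]
    | cons y yt =>
      simp only [cpN]
      split_ifs with h
      · subst h; simp only [Nat.add_comm 1, List.take_succ_cons]; rw [ih]
      · simp

theorem cpN_max : ∀ (xs ys : List String) (s : Nat), s ≤ xs.length → s ≤ ys.length →
    xs.take s = ys.take s → s ≤ cpN xs ys := by
  intro xs
  induction xs with
  | nil =>
    intro ys s h1 _ _
    have : s = 0 := by simpa using h1
    simp [this]
  | cons x xt ih =>
    intro ys s h1 h2 he
    cases s with
    | zero => simp
    | succ m =>
      cases ys with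
      | nil => simp at h2
      | cons y yt =>
        simp only [List.take_succ_cons, List.cons.injEq] at he
        simp only [cpN, he.1, if_true]
        have := ih yt m (by simpa using h1) (by simpa using h2) he.2
        omega

-- translate reverse-take to drop: common suffix of length c
theorem drop_eq_of_cpN_rev (la lb : List String) :
    la.drop (la.length - cpN la.reverse lb.reverse) = lb.drop (lb.length - cpN la.reverse lb.reverse) := by
  have h := cpN_take la.reverse lb.reverse
  rw [List.take_reverse, List.take_reverse] at h
  exact List.reverse_injective h

theorem cpN_rev_ge (la lb : List String) (i j : Nat) (hi : i ≤ la.length) (hj : j ≤ lb.length)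
    (hlen : la.length - i = lb.length - j) (hd : la.drop i = lb.drop j) :
    la.length - i ≤ cpN la.reverse lb.reverse := by
  apply cpN_max
  · simp only [List.length_reverse]; omega
  · simp only [List.length_reverse]; omega
  · rw [List.take_reverse, List.take_reverse,
      show la.length - (la.length - i) = i by omega,
      show lb.length - (la.length - i) = j by omega, hd]

-- main correspondence for one pair of chains
theorem main_correspondence (d : PySem.Dict String String) (la lb : List String) (x y : String)
    (ha : PChain d x la) (hb : PChain d y lb) (N : Nat) (hla : la.length < N) (hlb : lb.length < N) :
    scanKeys (buildOrbitMap d x 0 PySem.Dict.empty N) (buildOrbitMap d y 0 PySem.Dict.empty N)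
      (buildOrbitMap d x 0 PySem.Dict.empty N).keys =
    (if commonPrefixLen la.reverse lb.reverse = 0 then 0
     else ((la.length : Int) - commonPrefixLen la.reverse lb.reverse) +
          ((lb.length : Int) - commonPrefixLen la.reverse lb.reverse)) := by
  have hndA : la.Nodup := isChain_nodup d la x ha
  have hndB : lb.Nodup := isChain_nodup d lb y hb
  have haoI : (buildOrbitMap d x 0 PySem.Dict.empty N).items = idxPairs 0 la := by
    have := buildOrbitMap_items d la x 0 PySem.Dict.empty N ha hndA (by intro p _; simp) hla
    simpa using this
  have hboI : (buildOrbitMap d y 0 PySem.Dict.empty N).items = idxPairs 0 lb := by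
    have := buildOrbitMap_items d lb y 0 PySem.Dict.empty N hb hndB (by intro p _; simp) hlb
    simpa using this
  set ao := buildOrbitMap d x 0 PySem.Dict.empty N with hao
  set bo := buildOrbitMap d y 0 PySem.Dict.empty N with hbo
  have haoK : ao.keys = la := by
    simp only [PySem.Dict.keys, haoI]
    simpa using idxPairs_map_fst 0 la
  have hboK : bo.keys = lb := by
    simp only [PySem.Dict.keys, hboI]
    simpa using idxPairs_map_fst 0 lb
  have haoN : ao.keys.Nodup := by rw [haoK]; exact hndA
  have hboN : bo.keys.Nodup := by rw [hboK]; exact hndB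
  have haoD : ∀ (j : Nat) (hj : j < la.length), ao.getD la[j] 0 = (j : Int) := by
    intro j hj
    apply PySem.Dict.getD_of_mem_items _ _ haoN
    rw [haoI]
    simpa using mem_idxPairs la 0 j hj
  have hboD : ∀ (j : Nat) (hj : j < lb.length), bo.getD lb[j] 0 = (j : Int) := by
    intro j hj
    apply PySem.Dict.getD_of_mem_items _ _ hboN
    rw [hboI]
    simpa using mem_idxPairs lb 0 j hj
  have hcont : ∀ k, bo.contains k = decide (k ∈ lb) := by
    intro k
    rw [PySem.Dict.contains_eq_decide_mem_keys, hboK]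
  -- if an element of la also occurs in lb, its tail index bounds the common suffix
  have hcommon : ∀ (i : Nat) (hi : i < la.length), la[i] ∈ lb →
      la.length - i ≤ cpN la.reverse lb.reverse := by
    intro i hi hmem
    obtain ⟨j, hj, hje⟩ := List.mem_iff_getElem.mp hmem
    have hdrop := isChain_cross d la lb x y ha hb i j hi hj hje.symm
    have hlen : la.length - i = lb.length - j := by
      have := congrArg List.length hdrop
      simp only [List.length_drop] at this
      omega
    exact cpN_rev_ge la lb i j (by omega) (by omega) hlen hdrop
  rw [haoK, scanKeys_eq_find]
  rw [commonPrefixLen_eq_cpN]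
  set c := cpN la.reverse lb.reverse with hc
  have hcA : c ≤ la.length := by
    have := cpN_le_left la.reverse lb.reverse
    simpa using this
  have hcB : c ≤ lb.length := by
    have := cpN_le_right la.reverse lb.reverse
    simpa using this
  by_cases hc0 : c = 0
  · -- no common ancestor at all
    have hfind : la.find? (fun k => bo.contains k) = none := by
      rw [List.find?_eq_none]
      intro k hk hbk
      simp only [hcont, decide_eq_true_eq] at hbk
      obtain ⟨i, hi, hie⟩ := List.mem_iff_getElem.mp hk
      rw [← hie] at hbk
      have := hcommon i hi hbk
      omega
    rw [hfind]
    simp [hc0]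
  · -- common suffix of positive length c: the first hit is at index la.length - c
    have hcpos : 0 < c := Nat.pos_of_ne_zero hc0
    have hi0 : la.length - c < la.length := by omega
    have hj0 : lb.length - c < lb.length := by omega
    have hsuf : la.drop (la.length - c) = lb.drop (lb.length - c) := drop_eq_of_cpN_rev la lb
    have hhead : la[la.length - c] = lb[lb.length - c] := by
      rw [List.drop_eq_getElem_cons hi0, List.drop_eq_getElem_cons hj0] at hsuf
      exact (List.cons.injEq _ _ _ _ ▸ hsuf : _ ∧ _).1
    have hfind : la.find? (fun k => bo.contains k) = some la[la.length - c] := by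
      conv_lhs => rw [← List.take_append_drop (la.length - c) la]
      rw [List.find?_append]
      have h1 : (la.take (la.length - c)).find? (fun k => bo.contains k) = none := by
        rw [List.find?_eq_none]
        intro k hk hbk
        simp only [hcont, decide_eq_true_eq] at hbk
        obtain ⟨i, hi, hie⟩ := List.mem_iff_getElem.mp hk
        simp only [List.length_take] at hi
        rw [List.getElem_take] at hie
        rw [← hie] at hbk
        have := hcommon i (by omega) hbk
        omega
      rw [h1, Option.none_or]
      rw [List.drop_eq_getElem_cons hi0, List.find?_cons_of_pos]
      rw [hcont, hhead]
      simp [List.getElem_mem]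
    rw [hfind]
    show ao.getD la[la.length - c] 0 + bo.getD la[la.length - c] 0 = _
    rw [haoD _ hi0, hhead, hboD _ hj0]
    have hne : ¬ ((c : Int) = 0) := by exact_mod_cast hc0
    rw [if_neg hne]
    simp only [hc] at hcA hcB ⊢
    omega

-- ===== VERDICT (by name: the statement is the Claim_ definition above) =====
theorem transfers_spec : Claim_equal_transfers := by
  intro orbits a b _ hpre
  obtain ⟨⟨na, hna, hea⟩, ⟨nb, hnb, heb⟩⟩ := hpre
  have hpa := chainFuel_isSome_of_escape (PySem.Dict.ofList orbits) na a (orbits.length + 1) (by omega) hea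
  have hpb := chainFuel_isSome_of_escape (PySem.Dict.ofList orbits) nb b (orbits.length + 1) (by omega) heb
  obtain ⟨la, hla⟩ := Option.isSome_iff_exists.mp hpa
  obtain ⟨lb, hlb⟩ := Option.isSome_iff_exists.mp hpb
  set d := PySem.Dict.ofList orbits with hd
  set N := orbits.length + 1 with hN
  have hcA : PChain d a la := isChain_of_chainFuel d N a la hla
  have hcB : PChain d b lb := isChain_of_chainFuel d N b lb hlb
  have hlenA : la.length < N := chainFuel_length_lt d N a la hla
  have hlenB : lb.length < N := chainFuel_length_lt d N b lb hlb
  show transfers orbits a b = transfers_alt orbits a b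
  unfold transfers transfers_alt
  rw [← hd, ← hN]
  simp only [chainList_eq_of_chainFuel d N a la hla, chainList_eq_of_chainFuel d N b lb hlb]
  exact main_correspondence d la lb a b hcA hcB N hlenA hlenB
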